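-- pv_equiv track=rewrite | github.com/constant94-dev/backjunPloblem | bruteforce/programmers_42840.py | solution
-- ===== SOURCE A (Python) =====
-- def solution(answers):
--     pattern1 = [1,2,3,4,5]
--     pattern2 = [2,1,2,3,2,4,2,5]
--     pattern3 = [3,3,1,1,2,2,4,4,5,5]
--     score = [0, 0, 0]
--     result = []
--
--     for idx, answer in enumerate(answers): # 인덱스 번호와 값을 동시에 사용할 때 'enumerate' 사용
--         if answer == pattern1[idx%len(pattern1)]:
--             score[0] += 1
--         if answer == pattern2[idx%len(pattern2)]:
--             score[1] += 1
--         if answer == pattern3[idx%len(pattern3)]: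
--             score[2] += 1
--
--     max_score = max(score)
--     for idx, s in enumerate(score):
--         if s == max_score:
--             result.append(idx+1) # 인덱스는 0 부터 시작하는데 수포자 번호는 1 부터 시작해서 1 증가시켜준다
--
--     return sorted(result)
-- ===== SOURCE B (Python) =====
-- def solution(answers):
--     patterns = [[1, 2, 3, 4, 5],
--                 [2, 1, 2, 3, 2, 4, 2, 5],
--                 [3, 3, 1, 1, 2, 2, 4, 4, 5, 5]]
--     scores = []
--     for p in patterns:
--         # rotating-queue scan: consume a working copy of the pattern element by
--         # element, refilling it when it runs out -- no indices, no modulo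
--         s = 0
--         rest = list(p)
--         for a in answers:
--             if not rest:
--                 rest = list(p)
--             if a == rest[0]:
--                 s += 1
--             rest = rest[1:]
--         scores.append(s)
--     best = max(scores)
--     return [k + 1 for k, s in enumerate(scores) if s == best]
-- ===== Notes on version B (the rewrite author's own statement) =====
-- stated objective: alternative
-- what changed: B replaces A's single fused loop with three modular-index counters by three independent rotating-queue scans: each pattern is consumed element by element as a working copy that is refilled when exhausted (no enumerate, no index/modulo arithmetic), and winners are then selected by a comprehension with no final sort.
import Mathlib
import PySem

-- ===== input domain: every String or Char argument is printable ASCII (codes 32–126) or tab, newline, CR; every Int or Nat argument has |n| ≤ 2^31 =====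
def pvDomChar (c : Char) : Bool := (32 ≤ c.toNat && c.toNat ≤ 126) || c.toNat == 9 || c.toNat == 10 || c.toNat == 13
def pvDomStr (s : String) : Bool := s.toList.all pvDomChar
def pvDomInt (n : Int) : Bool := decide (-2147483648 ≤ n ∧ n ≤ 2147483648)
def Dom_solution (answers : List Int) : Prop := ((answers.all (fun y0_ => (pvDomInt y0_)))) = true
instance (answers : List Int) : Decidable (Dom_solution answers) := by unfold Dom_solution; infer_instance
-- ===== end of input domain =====

-- B replaces A's fused modular-index loop by three rotating-queue scans (a working copy of each
-- pattern is consumed and refilled, no indices/modulo); an alternative decomposition, not faster.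

-- ===== PORT A =====
-- Python mutates the list score[0..2]; ported as a triple of the same three counters.
def solution (answers : List Int) : List Int :=
  let pattern1 : List Int := [1,2,3,4,5]
  let pattern2 : List Int := [2,1,2,3,2,4,2,5]
  let pattern3 : List Int := [3,3,1,1,2,2,4,4,5,5]
  let score : Int × Int × Int :=
    (PySem.List.enumerate answers).foldl
      (fun (sc : Int × Int × Int) (ia : Int × Int) =>
        -- idx%len(pattern) is always in range, so pyGetD's default is never used
        let sc := if ia.2 = PySem.List.pyGetD pattern1 (PySem.Int.mod ia.1 5) 0 then (sc.1 + 1, sc.2.1, sc.2.2) else sc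
        let sc := if ia.2 = PySem.List.pyGetD pattern2 (PySem.Int.mod ia.1 8) 0 then (sc.1, sc.2.1 + 1, sc.2.2) else sc
        let sc := if ia.2 = PySem.List.pyGetD pattern3 (PySem.Int.mod ia.1 10) 0 then (sc.1, sc.2.1, sc.2.2 + 1) else sc
        sc)
      (0, 0, 0)
  let scoreList : List Int := [score.1, score.2.1, score.2.2]
  -- max(score): scoreList has three elements, so max? is some; getD's default is never used
  let max_score : Int := (PySem.List.max? scoreList (fun x => x)).getD 0
  let result : List Int :=
    (PySem.List.enumerate scoreList).foldl
      (fun acc (p : Int × Int) => if p.2 = max_score then acc ++ [p.1 + 1] else acc) []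
  PySem.List.sorted result (fun x => x) false

-- ===== PORT B =====
def solution_alt (answers : List Int) : List Int :=
  let patterns : List (List Int) := [[1,2,3,4,5],[2,1,2,3,2,4,2,5],[3,3,1,1,2,2,4,4,5,5]]
  let scores : List Int := patterns.foldl (fun acc p =>
    -- rotating-queue scan: state (s, rest); refill rest from p when empty
    let sr : Int × List Int :=
      answers.foldl
        (fun (sr : Int × List Int) a =>
          let rest := if sr.2 = [] then p else sr.2
          -- rest[0]: rest is nonempty here, so pyGetD's default is never used
          ((if a = PySem.List.pyGetD rest 0 0 then sr.1 + 1 else sr.1),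
           PySem.List.slice rest (some 1) none))
        (0, p)
    acc ++ [sr.1]) []
  let best : Int := (PySem.List.max? scores (fun x => x)).getD 0
  (PySem.List.enumerate scores).filterMap
    (fun q => if q.2 = best then some (q.1 + 1) else none)

-- ===== PRECONDITION & SPEC =====
def Spec_solution (answers : List Int) (out : List Int) : Prop := out = solution_alt answers
instance (answers : List Int) (out : List Int) : Decidable (Spec_solution answers out) := by unfold Spec_solution; infer_instance

-- ===== CLAIM (what is proved, stated in full; the proofs are below) =====
def Claim_equal_solution : Prop := ∀ (answers : List Int), Dom_solution answers → Spec_solution answers (solution answers)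

-- ===== LEMMAS AND PROOFS =====

-- canonical per-pattern score: 0/1 contribution of each answer at position s, s counted modulo len p
def pvScore (p : List Int) (answers : List Int) (s : Int) : Int :=
  (((PySem.List.enumerate answers s).filter
      (fun ia => ia.2 == PySem.List.pyGetD p (PySem.Int.mod ia.1 (PySem.List.len p)) 0)).map
    (fun _ => (1 : Int))).sum

lemma pvLen1 : PySem.List.len ([1,2,3,4,5] : List Int) = 5 := by simp [PySem.List.len]
lemma pvLen2 : PySem.List.len ([2,1,2,3,2,4,2,5] : List Int) = 8 := by simp [PySem.List.len]
lemma pvLen3 : PySem.List.len ([3,3,1,1,2,2,4,4,5,5] : List Int) = 10 := by simp [PySem.List.len]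

lemma pvScore_cons (p : List Int) (h : Int) (t : List Int) (s : Int) :
    pvScore p (h :: t) s
      = (if h = PySem.List.pyGetD p (PySem.Int.mod s (PySem.List.len p)) 0 then 1 else 0)
        + pvScore p t (s + 1) := by
  by_cases hp : h = PySem.List.pyGetD p (PySem.Int.mod s (PySem.List.len p)) 0 <;>
    [skip; skip] <;>
    simp only [PySem.List.len] at hp <;>
    simp [pvScore, PySem.List.enumerate_cons, PySem.List.len, hp]

-- A's fused three-counter loop computes exactly the three canonical scores
lemma fused_eq_scores (answers : List Int) : ∀ (s a b c : Int),
    (PySem.List.enumerate answers s).foldl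
      (fun (sc : Int × Int × Int) (ia : Int × Int) =>
        let sc := if ia.2 = PySem.List.pyGetD [1,2,3,4,5] (PySem.Int.mod ia.1 5) 0 then (sc.1 + 1, sc.2.1, sc.2.2) else sc
        let sc := if ia.2 = PySem.List.pyGetD [2,1,2,3,2,4,2,5] (PySem.Int.mod ia.1 8) 0 then (sc.1, sc.2.1 + 1, sc.2.2) else sc
        let sc := if ia.2 = PySem.List.pyGetD [3,3,1,1,2,2,4,4,5,5] (PySem.Int.mod ia.1 10) 0 then (sc.1, sc.2.1, sc.2.2 + 1) else sc
        sc)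
      (a, b, c)
    = (a + pvScore [1,2,3,4,5] answers s,
       b + pvScore [2,1,2,3,2,4,2,5] answers s,
       c + pvScore [3,3,1,1,2,2,4,4,5,5] answers s) := by
  induction answers with
  | nil => intro s a b c; simp [pvScore, PySem.List.enumerate_nil]
  | cons h t ih =>
    intro s a b c
    rw [PySem.List.enumerate_cons]
    simp only [List.foldl_cons]
    rw [pvScore_cons, pvScore_cons, pvScore_cons, pvLen1, pvLen2, pvLen3]
    by_cases h1 : h = PySem.List.pyGetD [1,2,3,4,5] (PySem.Int.mod s 5) 0 <;>
      by_cases h2 : h = PySem.List.pyGetD [2,1,2,3,2,4,2,5] (PySem.Int.mod s 8) 0 <;>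
        by_cases h3 : h = PySem.List.pyGetD [3,3,1,1,2,2,4,4,5,5] (PySem.Int.mod s 10) 0 <;>
          (first
            | simp only [if_pos h1] | simp only [if_neg h1]) <;>
          (first
            | simp only [if_pos h2] | simp only [if_neg h2]) <;>
          (first
            | simp only [if_pos h3] | simp only [if_neg h3]) <;>
          rw [ih] <;> simp [Prod.ext_iff] <;> omega

-- the head comparison of pvScore at a natural start index m reads p[m % len p]
lemma pvScore_cons_nat (p : List Int) (h : Int) (t : List Int) (m : Nat) :
    pvScore p (h :: t) (m : Int)
      = (if h = p.getD (m % p.length) 0 then 1 else 0) + pvScore p t ((m : Int) + 1) := by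
  rw [pvScore_cons, PySem.List.len_eq, PySem.Int.mod_natCast, PySem.List.pyGetD_natCast]

-- pvScore depends on the start index only through its residue mod len p
lemma pvScore_mod (p : List Int) : ∀ (t : List Int) (m m' : Nat),
    m % p.length = m' % p.length → pvScore p t (m : Int) = pvScore p t (m' : Int) := by
  intro t
  induction t with
  | nil => intro m m' _; simp [pvScore, PySem.List.enumerate_nil]
  | cons h t ih =>
    intro m m' hmm
    rw [pvScore_cons_nat, pvScore_cons_nat, hmm]
    have h1 : ((m : Int) + 1) = ((m + 1 : Nat) : Int) := by push_cast; ring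
    have h2 : ((m' : Int) + 1) = ((m' + 1 : Nat) : Int) := by push_cast; ring
    rw [h1, h2, ih (m + 1) (m' + 1) (by simp [Nat.add_mod, hmm])]

-- B's rotating-queue fold over answers starting with rest = p.drop m computes pvScore from index m
lemma rot_fold (p : List Int) (hp : p ≠ []) : ∀ (t : List Int) (m : Nat) (acc : Int), m ≤ p.length →
    (t.foldl
        (fun (sr : Int × List Int) a =>
          ((if a = PySem.List.pyGetD (if sr.2 = [] then p else sr.2) 0 0 then sr.1 + 1 else sr.1),
           PySem.List.slice (if sr.2 = [] then p else sr.2) (some 1) none))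
        (acc, p.drop m)).1 = acc + pvScore p t (m : Int) := by
  intro t
  induction t with
  | nil => intro m acc _; simp [pvScore, PySem.List.enumerate_nil]
  | cons a t ih =>
    intro m acc hm
    simp only [List.foldl_cons]
    rw [pvScore_cons_nat]
    have hstep : ((m : Int) + 1) = ((m + 1 : Nat) : Int) := by push_cast; ring
    by_cases hlt : m < p.length
    · have hne : p.drop m ≠ [] := by
        simp only [ne_eq, List.drop_eq_nil_iff]; omega
      have hhead : PySem.List.pyGetD (p.drop m) 0 0 = p.getD (m % p.length) 0 := by
        rw [Nat.mod_eq_of_lt hlt]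
        simp [PySem.List.pyGetD_zero, List.getD, List.getElem?_drop]
      have htail : PySem.List.slice (p.drop m) (some 1) none = p.drop (m + 1) := by
        rw [PySem.List.slice_from_one, List.tail_drop]
      simp only [if_neg hne, hhead, htail]
      rw [ih (m + 1) _ (by omega), hstep]
      split_ifs <;> ring
    · have hm' : m = p.length := by omega
      have hnil : p.drop m = [] := by rw [hm']; exact List.drop_length
      have hhead : PySem.List.pyGetD p 0 0 = p.getD (m % p.length) 0 := by
        rw [hm', Nat.mod_self]
        simp [PySem.List.pyGetD_zero]
      have htail : PySem.List.slice p (some 1) none = p.drop 1 := by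
        rw [PySem.List.slice_from_one, ← List.drop_one]
      have hlen1 : 1 ≤ p.length := by
        cases p with
        | nil => exact absurd rfl hp
        | cons x xs => simp
      have hcongr : pvScore p t ((1 : Nat) : Int) = pvScore p t ((m + 1 : Nat) : Int) := by
        apply pvScore_mod
        rw [hm']
        exact (Nat.add_mod_left _ _).symm
      simp only [hnil, reduceIte]
      rw [htail, ih 1 _ hlen1, hcongr, hhead, hstep]
      split_ifs <;> ring

-- selecting the winners from the three scores: A's append-then-sort equals B's filterMap
lemma tail_eq (x y z : Int) :
    PySem.List.sorted
      ((PySem.List.enumerate ([x, y, z] : List Int)).foldl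
        (fun acc (p : Int × Int) =>
          if p.2 = (PySem.List.max? ([x, y, z] : List Int) (fun v => v)).getD 0 then acc ++ [p.1 + 1] else acc) [])
      (fun v => v) false
    = (PySem.List.enumerate ([x, y, z] : List Int)).filterMap
        (fun p => if p.2 = (PySem.List.max? ([x, y, z] : List Int) (fun v => v)).getD 0 then some (p.1 + 1) else none) := by
  simp only [PySem.List.enumerate_cons, PySem.List.enumerate_nil, List.foldl_cons, List.foldl_nil,
    List.filterMap_cons, List.filterMap_nil]
  by_cases hx : x = (PySem.List.max? ([x, y, z] : List Int) (fun v => v)).getD 0 <;>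
    by_cases hy : y = (PySem.List.max? ([x, y, z] : List Int) (fun v => v)).getD 0 <;>
      by_cases hz : z = (PySem.List.max? ([x, y, z] : List Int) (fun v => v)).getD 0 <;>
        (first | simp only [if_pos hx] | simp only [if_neg hx]) <;>
        (first | simp only [if_pos hy] | simp only [if_neg hy]) <;>
        (first | simp only [if_pos hz] | simp only [if_neg hz]) <;>
        decide

-- ===== VERDICT (by name: the statement is the Claim_ definition above) =====
theorem solution_spec : Claim_equal_solution := by
  intro answers _
  unfold Spec_solution solution solution_alt
  simp only [List.foldl_cons, List.foldl_nil, List.nil_append]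
  rw [fused_eq_scores answers 0 0 0 0]
  have h1 := rot_fold [1,2,3,4,5] (by simp) answers 0 0 (by omega)
  have h2 := rot_fold [2,1,2,3,2,4,2,5] (by simp) answers 0 0 (by omega)
  have h3 := rot_fold [3,3,1,1,2,2,4,4,5,5] (by simp) answers 0 0 (by omega)
  simp only [List.drop_zero, Nat.cast_zero, zero_add] at h1 h2 h3
  simp only [h1, h2, h3, zero_add]
  exact tail_eq _ _ _
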